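-- pv_equiv track=rewrite | github.com/ebu/benchmarkstt | src/benchmarkstt/diff/__init__.py | get_opcode_counts
-- ===== SOURCE A (Python) =====
-- from collections import namedtuple
--
-- OpcodeCounts = namedtuple('OpcodeCounts',
--                           ('equal', 'replace', 'insert', 'delete'))
--
-- def get_opcode_counts(opcodes) -> OpcodeCounts:
--     counts = OpcodeCounts(0, 0, 0, 0)._asdict()
--     for tag, alo, ahi, blo, bhi in opcodes:
--         if tag == 'equal':
--             counts[tag] += ahi - alo
--         elif tag == 'insert':
--             counts[tag] += bhi - blo
--         elif tag == 'delete':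
--             counts[tag] += ahi - alo
--         elif tag == 'replace':
--             ca = ahi - alo
--             cb = bhi - blo
--             if ca < cb:
--                 counts['insert'] += cb - ca
--                 counts['replace'] += ca
--             elif ca > cb:
--                 counts['delete'] += ca - cb
--                 counts['replace'] += cb
--             else:
--                 counts[tag] += ahi - alo
--     return OpcodeCounts(counts['equal'], counts['replace'], counts['insert'], counts['delete'])
-- ===== SOURCE B (Python) =====
-- from collections import namedtuple
--
-- OpcodeCounts = namedtuple('OpcodeCounts',
--                           ('equal', 'replace', 'insert', 'delete'))
--
-- def get_opcode_counts(opcodes) -> OpcodeCounts: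
--     # Staged pipeline: normalize each opcode to (tag, ca, cb), then compute each
--     # total as an independent sum over a filtered view of that list.
--     ops = [(tag, ahi - alo, bhi - blo) for tag, alo, ahi, blo, bhi in opcodes]
--     equal = sum(ca for tag, ca, cb in ops if tag == 'equal')
--     replace = sum(min(ca, cb) for tag, ca, cb in ops if tag == 'replace')
--     insert = (sum(cb for tag, ca, cb in ops if tag == 'insert')
--               + sum(max(0, cb - ca) for tag, ca, cb in ops if tag == 'replace'))
--     delete = (sum(ca for tag, ca, cb in ops if tag == 'delete')
--               + sum(max(0, ca - cb) for tag, ca, cb in ops if tag == 'replace'))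
--     return OpcodeCounts(equal, replace, insert, delete)
-- ===== Notes on version B (the rewrite author's own statement) =====
-- stated objective: alternative
-- what changed: Replaces A's single stateful loop over a namedtuple-derived dict with a staged map/filter/sum pipeline: opcodes are first normalized to (tag, ca, cb) tuples, then each of the four totals is computed as an independent declarative sum over a filtered view, with the replace branch's three-way split collapsed into min/max arithmetic.
import Mathlib
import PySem

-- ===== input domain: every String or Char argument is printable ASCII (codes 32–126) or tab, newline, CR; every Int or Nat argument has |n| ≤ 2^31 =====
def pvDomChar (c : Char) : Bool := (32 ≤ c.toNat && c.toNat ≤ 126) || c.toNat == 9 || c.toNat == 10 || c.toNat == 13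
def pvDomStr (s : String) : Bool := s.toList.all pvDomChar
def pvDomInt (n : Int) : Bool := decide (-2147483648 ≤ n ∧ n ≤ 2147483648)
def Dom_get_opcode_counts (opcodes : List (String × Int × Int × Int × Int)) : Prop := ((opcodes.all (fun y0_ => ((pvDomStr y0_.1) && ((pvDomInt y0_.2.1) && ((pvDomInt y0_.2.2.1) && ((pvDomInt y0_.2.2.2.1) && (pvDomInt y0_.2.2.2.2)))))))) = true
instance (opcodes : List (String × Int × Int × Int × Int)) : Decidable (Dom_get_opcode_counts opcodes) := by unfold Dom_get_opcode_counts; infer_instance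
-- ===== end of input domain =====

-- B replaces A's single stateful accumulator loop with a staged map/filter/sum pipeline
-- (normalize to (tag, ca, cb), then four independent declarative sums); objective: alternative.
-- ===== PORT A =====
-- A builds a dict with fixed keys equal/replace/insert/delete; ported as a 4-tuple
-- (equal, replace, insert, delete), with A's branch structure kept exactly.
def get_opcode_counts_step (c : Int × Int × Int × Int)
    (op : String × Int × Int × Int × Int) : Int × Int × Int × Int :=
  let (tag, alo, ahi, blo, bhi) := op
  let (e, r, i, d) := c
  if tag == "equal" then (e + (ahi - alo), r, i, d)
  else if tag == "insert" then (e, r, i + (bhi - blo), d)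
  else if tag == "delete" then (e, r, i, d + (ahi - alo))
  else if tag == "replace" then
    let ca := ahi - alo
    let cb := bhi - blo
    if ca < cb then (e, r + ca, i + (cb - ca), d)
    else if ca > cb then (e, r + cb, i, d + (ca - cb))
    else (e, r + (ahi - alo), i, d)
  else (e, r, i, d)

def get_opcode_counts (opcodes : List (String × Int × Int × Int × Int)) : Int × Int × Int × Int :=
  opcodes.foldl get_opcode_counts_step (0, 0, 0, 0)

-- ===== PORT B =====
-- Staged pipeline, following Source B: the normalizing comprehension becomes List.map,
-- each 'sum(... for ... if tag == t)' becomes (filter, map, sum).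
def get_opcode_counts_alt (opcodes : List (String × Int × Int × Int × Int)) : Int × Int × Int × Int :=
  let ops := opcodes.map (fun op => (op.1, op.2.2.1 - op.2.1, op.2.2.2.2 - op.2.2.2.1))
  let equal := ((ops.filter (fun t => t.1 == "equal")).map (fun t => t.2.1)).sum
  let replace := ((ops.filter (fun t => t.1 == "replace")).map (fun t => min t.2.1 t.2.2)).sum
  let insert := ((ops.filter (fun t => t.1 == "insert")).map (fun t => t.2.2)).sum
              + ((ops.filter (fun t => t.1 == "replace")).map (fun t => max 0 (t.2.2 - t.2.1))).sum
  let delete := ((ops.filter (fun t => t.1 == "delete")).map (fun t => t.2.1)).sum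
              + ((ops.filter (fun t => t.1 == "replace")).map (fun t => max 0 (t.2.1 - t.2.2))).sum
  (equal, replace, insert, delete)

-- ===== PRECONDITION & SPEC =====
def Spec_get_opcode_counts (opcodes : List (String × Int × Int × Int × Int)) (out : Int × Int × Int × Int) : Prop := out = get_opcode_counts_alt opcodes
instance (opcodes : List (String × Int × Int × Int × Int)) (out : Int × Int × Int × Int) : Decidable (Spec_get_opcode_counts opcodes out) := by unfold Spec_get_opcode_counts; infer_instance

-- ===== CLAIM =====
def Claim_equal_get_opcode_counts : Prop := ∀ (opcodes : List (String × Int × Int × Int × Int)), Dom_get_opcode_counts opcodes → Spec_get_opcode_counts opcodes (get_opcode_counts opcodes)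

-- ===== LEMMAS AND PROOFS =====
-- The four totals of B's pipeline, as functions of the raw opcode list.
def pvE (l : List (String × Int × Int × Int × Int)) : Int :=
  (((l.map (fun op => (op.1, op.2.2.1 - op.2.1, op.2.2.2.2 - op.2.2.2.1))).filter (fun t => t.1 == "equal")).map (fun t => t.2.1)).sum
def pvR (l : List (String × Int × Int × Int × Int)) : Int :=
  (((l.map (fun op => (op.1, op.2.2.1 - op.2.1, op.2.2.2.2 - op.2.2.2.1))).filter (fun t => t.1 == "replace")).map (fun t => min t.2.1 t.2.2)).sum
def pvI (l : List (String × Int × Int × Int × Int)) : Int :=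
  (((l.map (fun op => (op.1, op.2.2.1 - op.2.1, op.2.2.2.2 - op.2.2.2.1))).filter (fun t => t.1 == "insert")).map (fun t => t.2.2)).sum
  + (((l.map (fun op => (op.1, op.2.2.1 - op.2.1, op.2.2.2.2 - op.2.2.2.1))).filter (fun t => t.1 == "replace")).map (fun t => max 0 (t.2.2 - t.2.1))).sum
def pvD (l : List (String × Int × Int × Int × Int)) : Int :=
  (((l.map (fun op => (op.1, op.2.2.1 - op.2.1, op.2.2.2.2 - op.2.2.2.1))).filter (fun t => t.1 == "delete")).map (fun t => t.2.1)).sum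
  + (((l.map (fun op => (op.1, op.2.2.1 - op.2.1, op.2.2.2.2 - op.2.2.2.1))).filter (fun t => t.1 == "replace")).map (fun t => max 0 (t.2.1 - t.2.2))).sum

theorem alt_eq_pv (l : List (String × Int × Int × Int × Int)) :
    get_opcode_counts_alt l = (pvE l, pvR l, pvI l, pvD l) := rfl

theorem foldl_char (l : List (String × Int × Int × Int × Int)) :
    ∀ e r i d : Int, l.foldl get_opcode_counts_step (e, r, i, d)
      = (e + pvE l, r + pvR l, i + pvI l, d + pvD l) := by
  induction l with
  | nil => intro e r i d; simp [pvE, pvR, pvI, pvD]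
  | cons op rest ih =>
    intro e r i d
    obtain ⟨tag, alo, ahi, blo, bhi⟩ := op
    simp only [List.foldl_cons, get_opcode_counts_step]
    by_cases h1 : tag = "equal" <;> by_cases h2 : tag = "insert" <;>
      by_cases h3 : tag = "delete" <;> by_cases h4 : tag = "replace" <;>
      simp_all [pvE, pvR, pvI, pvD, min_def, max_def] <;>
      (try split_ifs) <;> omega

-- ===== VERDICT =====
theorem get_opcode_counts_spec : Claim_equal_get_opcode_counts := by
  intro opcodes _
  unfold Spec_get_opcode_counts get_opcode_counts
  rw [alt_eq_pv, foldl_char]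
  simp
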